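-- pv_equiv track=rewrite | github.com/boonys20/codility | Fast And Curious Challenge/solution.py | Da_Best_Solution
-- ===== SOURCE A (Python) =====
-- def Da_Best_Solution(A):
--     N = len(A)
--     cost = 0
--     for i in range(1, N):
--         cost += A[N-1] - A[i]
--     best = cost
--     for X in range(N - 1):
--         cost -= A[N - 1] - A[X + 1]
--         cost += (X + 1) * (A[X + 1] - A[X])
--         best = min(best, cost)
--     return best % (10**9 + 7)
-- ===== SOURCE B (Python) =====
-- def Da_Best_Solution(A):
--     N = len(A)
--     if N <= 1:
--         return 0
--     P = [0]
--     s = 0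
--     for a in A:
--         s += a
--         P.append(s)
--     last = A[N - 1]
--     best = (N - 1) * last - (s - P[1])  # split before index 0 (no raise step taken)
--     for X in range(N - 1):
--         c = (X + 1) * A[X + 1] - P[X + 1] + (N - 2 - X) * last - (s - P[X + 2])
--         if c < best:
--             best = c
--     return best % (10 ** 9 + 7)
-- ===== Notes on version B (the rewrite author's own statement) =====
-- stated objective: alternative
-- what changed: B replaces A's running-delta cost accumulator with a prefix-sum table built in one pass, computing each split's cost independently by a closed formula (X+1)*A[X+1]-P[X+1]+(N-2-X)*A[N-1]-(S-P[X+2]) and taking the running minimum.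
import Mathlib
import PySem

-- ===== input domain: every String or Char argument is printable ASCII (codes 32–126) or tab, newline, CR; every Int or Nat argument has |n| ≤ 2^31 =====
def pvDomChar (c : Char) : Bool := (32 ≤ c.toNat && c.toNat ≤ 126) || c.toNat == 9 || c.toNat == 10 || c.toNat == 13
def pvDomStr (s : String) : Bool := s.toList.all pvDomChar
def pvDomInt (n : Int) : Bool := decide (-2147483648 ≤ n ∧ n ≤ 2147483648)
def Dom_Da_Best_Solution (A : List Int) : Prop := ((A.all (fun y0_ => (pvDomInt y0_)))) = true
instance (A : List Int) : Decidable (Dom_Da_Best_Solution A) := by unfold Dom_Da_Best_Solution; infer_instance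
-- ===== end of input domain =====

-- B computes each split's cost independently from a prefix-sum table instead of A's
-- running-delta accumulator; same O(n) cost, alternative decomposition.

-- ===== PORT A =====
-- Every list index A touches is in range whenever it is evaluated, so A[i] is ported
-- as pyGetD with default 0; the default is never hit, so the port is exact.
def Da_Best_Solution (A : List Int) : Int :=
  let N : Int := A.length
  let cost : Int := (PySem.List.pyRange 1 N 1).foldl
    (fun c i => c + (PySem.List.pyGetD A (N - 1) 0 - PySem.List.pyGetD A i 0)) 0
  let best : Int := cost
  let st := (PySem.List.pyRange 0 (N - 1) 1).foldl
    (fun (st : Int × Int) X =>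
      let c := st.1 - (PySem.List.pyGetD A (N - 1) 0 - PySem.List.pyGetD A (X + 1) 0)
      let c := c + (X + 1) * (PySem.List.pyGetD A (X + 1) 0 - PySem.List.pyGetD A X 0)
      (c, min st.2 c)) (cost, best)
  PySem.Int.mod st.2 (10 ^ 9 + 7)

-- ===== PORT B =====
def Da_Best_Solution_alt (A : List Int) : Int :=
  let N : Int := A.length
  if N ≤ 1 then 0 else
    let ps := A.foldl (fun (st : List Int × Int) a => (st.1 ++ [st.2 + a], st.2 + a)) ([0], 0)
    let P := ps.1
    let s := ps.2
    let last := PySem.List.pyGetD A (N - 1) 0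
    let best0 := (N - 1) * last - (s - PySem.List.pyGetD P 1 0)
    let best := (PySem.List.pyRange 0 (N - 1) 1).foldl
      (fun b X =>
        let c := (X + 1) * PySem.List.pyGetD A (X + 1) 0 - PySem.List.pyGetD P (X + 1) 0
                  + (N - 2 - X) * last - (s - PySem.List.pyGetD P (X + 2) 0)
        if c < b then c else b) best0
    PySem.Int.mod best (10 ^ 9 + 7)

-- ===== PRECONDITION & SPEC =====
def Spec_Da_Best_Solution (A : List Int) (out : Int) : Prop := out = Da_Best_Solution_alt A
instance (A : List Int) (out : Int) : Decidable (Spec_Da_Best_Solution A out) := by unfold Spec_Da_Best_Solution; infer_instance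

-- ===== CLAIM (what is proved, stated in full; the proofs are below) =====
def Claim_equal_Da_Best_Solution : Prop := ∀ (A : List Int), Dom_Da_Best_Solution A → Spec_Da_Best_Solution A (Da_Best_Solution A)

-- ===== LEMMAS AND PROOFS =====

-- prefix-sum list built by B's loop
def pvPre (s : Int) : List Int → List Int
  | [] => []
  | a :: t => (s + a) :: pvPre (s + a) t

-- closed-form cost of the split after position k-1 (k = 0 is A's initial cost)
def pvClosed (A : List Int) (k : Nat) : Int :=
  (k : Int) * A.getD k 0 - (A.take k).sum
    + ((A.length : Int) - 1 - (k : Int)) * A.getD (A.length - 1) 0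
    - (A.sum - (A.take (k + 1)).sum)

lemma pvPre_spec : ∀ (l acc : List Int) (s : Int),
    l.foldl (fun (st : List Int × Int) a => (st.1 ++ [st.2 + a], st.2 + a)) (acc, s)
      = (acc ++ pvPre s l, s + l.sum) := by
  intro l
  induction l with
  | nil => intro acc s; simp [pvPre]
  | cons a t ih =>
    intro acc s
    simp only [List.foldl_cons, ih, pvPre, List.sum_cons]
    rw [Prod.mk.injEq]
    exact ⟨by simp, by ring⟩

lemma pvPre_getD : ∀ (l : List Int) (s : Int) (j : Nat), j < l.length →
    (pvPre s l).getD j 0 = s + (l.take (j + 1)).sum := by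
  intro l
  induction l with
  | nil => intro s j h; simp at h
  | cons a t ih =>
    intro s j h
    cases j with
    | zero => simp [pvPre]
    | succ j =>
      rw [show pvPre s (a :: t) = (s + a) :: pvPre (s + a) t from rfl, List.getD_cons_succ,
        ih (s + a) j (by simpa using h)]
      simp [List.take_succ_cons]
      ring

lemma pvTake_succ (A : List Int) (k : Nat) (h : k < A.length) :
    (A.take (k + 1)).sum = (A.take k).sum + A.getD k 0 := by
  rw [List.sum_take_succ A k h]
  simp [List.getElem?_eq_getElem h]

-- the two loops, run in lockstep: A's accumulator equals the closed form, minima agree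
lemma pv_fold_pair (A P : List Int) (s L N : Int) (F : Nat → Int) (M : Nat)
    (hF : ∀ k : Nat, k < M → F (k + 1)
        = F k - (L - PySem.List.pyGetD A ((k : Int) + 1) 0)
            + ((k : Int) + 1) * (PySem.List.pyGetD A ((k : Int) + 1) 0 - PySem.List.pyGetD A (k : Int) 0))
    (hB : ∀ k : Nat, k < M →
        ((k : Int) + 1) * PySem.List.pyGetD A ((k : Int) + 1) 0 - PySem.List.pyGetD P ((k : Int) + 1) 0
          + (N - 2 - (k : Int)) * L - (s - PySem.List.pyGetD P ((k : Int) + 2) 0) = F (k + 1)) :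
    (PySem.List.pyRange 0 (M : Int) 1).foldl
        (fun (st : Int × Int) X =>
          (st.1 - (L - PySem.List.pyGetD A (X + 1) 0)
             + (X + 1) * (PySem.List.pyGetD A (X + 1) 0 - PySem.List.pyGetD A X 0),
           min st.2 (st.1 - (L - PySem.List.pyGetD A (X + 1) 0)
             + (X + 1) * (PySem.List.pyGetD A (X + 1) 0 - PySem.List.pyGetD A X 0)))) (F 0, F 0)
      = (F M,
         (PySem.List.pyRange 0 (M : Int) 1).foldl
           (fun b X =>
             if (X + 1) * PySem.List.pyGetD A (X + 1) 0 - PySem.List.pyGetD P (X + 1) 0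
                  + (N - 2 - X) * L - (s - PySem.List.pyGetD P (X + 2) 0) < b
             then (X + 1) * PySem.List.pyGetD A (X + 1) 0 - PySem.List.pyGetD P (X + 1) 0
                  + (N - 2 - X) * L - (s - PySem.List.pyGetD P (X + 2) 0)
             else b) (F 0)) := by
  induction M with
  | zero => simp [PySem.List.pyRange_one_eq_nil]
  | succ m ih =>
    have hcast : ((m + 1 : Nat) : Int) = (m : Int) + 1 := by push_cast; ring
    rw [hcast, PySem.List.pyRange_one_succ_right (by positivity), List.foldl_append, List.foldl_append]
    rw [ih (fun k hk => hF k (by omega)) (fun k hk => hB k (by omega))]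
    simp only [List.foldl_cons, List.foldl_nil]
    rw [← hF m (by omega), hB m (by omega)]
    rw [Prod.mk.injEq]
    refine ⟨rfl, ?_⟩
    simp only [min_def]
    split_ifs <;> omega

lemma pvSumMapSub (l : List Int) (c : Int) : (l.map (fun v => c - v)).sum = (l.length : Int) * c - l.sum := by
  induction l with
  | nil => simp
  | cons a t ih => simp [ih]; ring

-- ===== VERDICT (by name: the statement is the Claim_ definition above) =====
theorem Da_Best_Solution_spec : Claim_equal_Da_Best_Solution := by
  intro A _
  unfold Spec_Da_Best_Solution
  by_cases h2 : 2 ≤ A.length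
  · have hNc : ((A.length : Int) - 1) = ((A.length - 1 : Nat) : Int) := by omega
    simp only [Da_Best_Solution, Da_Best_Solution_alt]
    rw [if_neg (by omega)]
    rw [pvPre_spec A [0] 0]
    simp only [List.cons_append, List.nil_append, zero_add]
    rw [hNc, PySem.List.pyGetD_natCast A (A.length - 1) 0]
    have hF : ∀ k : Nat, k < A.length - 1 → pvClosed A (k + 1)
        = pvClosed A k - (A.getD (A.length - 1) 0 - PySem.List.pyGetD A ((k : Int) + 1) 0)
            + ((k : Int) + 1) * (PySem.List.pyGetD A ((k : Int) + 1) 0 - PySem.List.pyGetD A (k : Int) 0) := by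
      intro k hk
      rw [show ((k : Int) + 1) = ((k + 1 : Nat) : Int) by push_cast; ring,
          PySem.List.pyGetD_natCast A (k + 1) 0, PySem.List.pyGetD_natCast A k 0]
      simp only [pvClosed]
      rw [pvTake_succ A (k + 1) (by omega), pvTake_succ A k (by omega)]
      push_cast
      ring
    have hB : ∀ k : Nat, k < A.length - 1 →
        ((k : Int) + 1) * PySem.List.pyGetD A ((k : Int) + 1) 0
            - PySem.List.pyGetD (0 :: pvPre 0 A) ((k : Int) + 1) 0
          + ((A.length : Int) - 2 - (k : Int)) * A.getD (A.length - 1) 0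
          - (A.sum - PySem.List.pyGetD (0 :: pvPre 0 A) ((k : Int) + 2) 0)
          = pvClosed A (k + 1) := by
      intro k hk
      rw [show ((k : Int) + 2) = ((k + 2 : Nat) : Int) by push_cast; ring,
          show ((k : Int) + 1) = ((k + 1 : Nat) : Int) by push_cast; ring,
          PySem.List.pyGetD_natCast A (k + 1) 0,
          PySem.List.pyGetD_natCast (0 :: pvPre 0 A) (k + 1) 0,
          PySem.List.pyGetD_natCast (0 :: pvPre 0 A) (k + 2) 0,
          List.getD_cons_succ, List.getD_cons_succ,
          pvPre_getD A 0 k (by omega), pvPre_getD A 0 (k + 1) (by omega)]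
      simp only [pvClosed]
      push_cast
      ring
    have hc0 : (PySem.List.pyRange 1 (A.length : Int) 1).foldl
        (fun c i => c + (A.getD (A.length - 1) 0 - PySem.List.pyGetD A i 0)) 0 = pvClosed A 0 := by
      rw [PySem.List.foldl_pyRange_pyGetD' A 0 (fun c v => c + (A.getD (A.length - 1) 0 - v)) 0
            (by norm_num),
          PySem.List.foldl_add, pvSumMapSub]
      have h1 : (A.take 1).sum + (A.drop 1).sum = A.sum := List.sum_take_add_sum_drop A 1
      have h2 : ((A.drop 1).length : Int) = (A.length : Int) - 1 := by
        simp; omega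
      simp only [pvClosed, List.take_zero, List.sum_nil, Int.toNat_one, Nat.zero_add]
      rw [h2]
      push_cast
      linear_combination -h1
    have hbest0 : ((A.length - 1 : Nat) : Int) * A.getD (A.length - 1) 0
        - (A.sum - PySem.List.pyGetD (0 :: pvPre 0 A) 1 0) = pvClosed A 0 := by
      rw [PySem.List.pyGetD_ofNat' (0 :: pvPre 0 A) 1 0, List.getD_cons_succ,
          pvPre_getD A 0 0 (by omega)]
      simp only [pvClosed, List.take_zero, List.sum_nil]
      push_cast [Nat.cast_sub (by omega : 1 ≤ A.length)]
      ring
    rw [hc0, hbest0,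
        pv_fold_pair A (0 :: pvPre 0 A) A.sum (A.getD (A.length - 1) 0) (A.length : Int)
          (pvClosed A) (A.length - 1) hF hB]
  · rcases A with _ | ⟨a, _ | ⟨b, t⟩⟩
    · rfl
    · simp [Da_Best_Solution, Da_Best_Solution_alt, PySem.List.pyRange_one_eq_nil, PySem.Int.mod]
    · exfalso; apply h2; simp
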